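-- pv_equiv track=rewrite | github.com/Tana-Tana/Python---PTIT | PY01039.py | Check
-- ===== SOURCE A (Python) =====
-- def Check(number):
--     # kiem tra vi tri
--     for i in range(len(number)-2):
--         if number[i] != number[i+2]:
--             return False
--     # kiem tra so khac nhau
--     res = []
--     for i in number:
--         if (i in res) == None:
--             res.append(i)
--     if len(res) > 2: return False
--     return True
-- ===== SOURCE B (Python) =====
-- def Check(number):
--     evens = number[::2]
--     odds = number[1::2]
--     return all(x == evens[0] for x in evens[1:]) and all(x == odds[0] for x in odds[1:])
-- ===== Notes on version B (the rewrite author's own statement) =====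
-- stated objective: simpler
-- what changed: Replaces A's index loop over i,i+2 pairs (plus a dead second loop whose membership-vs-None test never fires) by slicing the string into even- and odd-position subsequences and checking each slice is constant.
import Mathlib
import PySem

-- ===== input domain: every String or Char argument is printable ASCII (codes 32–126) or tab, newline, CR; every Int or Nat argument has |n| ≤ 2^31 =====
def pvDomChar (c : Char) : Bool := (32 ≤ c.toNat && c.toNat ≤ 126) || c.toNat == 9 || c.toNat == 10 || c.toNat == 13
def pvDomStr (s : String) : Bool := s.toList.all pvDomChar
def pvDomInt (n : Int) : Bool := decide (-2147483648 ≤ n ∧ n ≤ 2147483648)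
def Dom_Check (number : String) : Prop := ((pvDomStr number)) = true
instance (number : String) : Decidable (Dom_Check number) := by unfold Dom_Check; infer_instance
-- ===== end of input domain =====

-- B checks that the even- and odd-position slices of the string are each constant, instead of
-- A's index loop comparing number[i] with number[i+2] (A's second loop is dead code); objective: simpler.

-- ===== PORT A =====
-- for i in range(len(number)-2): if number[i] != number[i+2]: return False
-- then: res = []; for i in number: if (i in res) == None: res.append(i)
-- if len(res) > 2: return False ; return True
def Check (number : String) : Bool :=
  let cs := number.toList
  if (PySem.List.pyRange 0 ((cs.length : Int) - 2) 1).any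
      (fun i => !(PySem.List.pyGet? cs i == PySem.List.pyGet? cs (i + 2))) then false
  else
    -- `(i in res) == None` compares a bool with None: ported as `some (…) == none`
    let res := cs.foldl
      (fun res c => if (some (res.contains c) == (none : Option Bool)) then res ++ [c] else res)
      ([] : List Char)
    if res.length > 2 then false else true

-- ===== PORT B =====
-- all(x == l[0] for x in l[1:]): l[0] is only evaluated when l[1:] is nonempty, hence head/tail
def pvAllEqFirst : List Char → Bool
  | [] => true
  | h :: t => t.all (fun x => x == h)

def Check_alt (number : String) : Bool :=
  let cs := number.toList
  let evens := (PySem.List.slice? cs none none 2).getD []      -- number[::2]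
  let odds := (PySem.List.slice? cs (some 1) none 2).getD []   -- number[1::2]
  pvAllEqFirst evens && pvAllEqFirst odds

-- ===== PRECONDITION & SPEC =====
def Spec_Check (number : String) (out : Bool) : Prop := out = Check_alt number
instance (number : String) (out : Bool) : Decidable (Spec_Check number out) := by unfold Spec_Check; infer_instance

-- ===== CLAIM (what is proved, stated in full; the proofs are below) =====
def Claim_equal_Check : Prop := ∀ (number : String), Dom_Check number → Spec_Check number (Check number)

-- ===== LEMMAS AND PROOFS =====

-- distance-2 chain condition, the common characterisation of both programs
def pvChain : List Char → Bool
  | a :: b :: c :: t => (a == c) && pvChain (b :: c :: t)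
  | _ => true

-- even-position elements of a list
def pvEvens : List Char → List Char
  | [] => []
  | [a] => [a]
  | a :: _ :: t => a :: pvEvens t

-- A's second loop never appends: `some b == none` is false
lemma pvResNil (cs res : List Char) :
    cs.foldl
      (fun res c => if (some (res.contains c) == (none : Option Bool)) then res ++ [c] else res)
      res = res := by
  induction cs generalizing res with
  | nil => rfl
  | cons c cs ih => exact ih res

lemma pvChain_iff (cs : List Char) :
    pvChain cs = true ↔ ∀ k : Nat, k + 2 < cs.length → cs[k]? = cs[k + 2]? := by
  fun_induction pvChain cs with
  | case1 a b c t ih =>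
    simp only [Bool.and_eq_true, beq_iff_eq, ih]
    constructor
    · rintro ⟨rfl, h⟩ k hk
      cases k with
      | zero => simp
      | succ k => simpa using h k (by simpa using hk)
    · intro h
      refine ⟨by simpa using h 0 (by simp), fun k hk => ?_⟩
      simpa using h (k + 1) (by simpa using hk)
  | case2 x h =>
    constructor
    · intro _ k hk
      exfalso
      rcases x with _ | ⟨a, _ | ⟨b, _ | ⟨c, t⟩⟩⟩
      · simp at hk
      · simp at hk
      · simp at hk
      · exact h a b c t rfl
    · intro _; rfl

lemma pvGet2 (cs : List Char) (k : Nat) :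
    PySem.List.pyGet? cs ((k : Int) + 2) = cs[k + 2]? := by
  rw [show ((k : Int) + 2) = ((k + 2 : Nat) : Int) by push_cast; ring, PySem.List.pyGet?_natCast]

lemma pvCheck_eq_chain (number : String) : Check number = pvChain number.toList := by
  unfold Check
  simp only [pvResNil]
  simp only [List.length_nil, Nat.reduceGT, if_false]
  set cs := number.toList with hcs
  by_cases h : (PySem.List.pyRange 0 ((cs.length : Int) - 2) 1).any
      (fun i => !(PySem.List.pyGet? cs i == PySem.List.pyGet? cs (i + 2))) = true
  · rw [if_pos h]
    rcases List.any_eq_true.mp h with ⟨i, hmem, hi⟩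
    rw [PySem.List.mem_pyRange_one] at hmem
    obtain ⟨h0, hlt⟩ := hmem
    lift i to Nat using h0 with k
    symm
    rw [← Bool.not_eq_true, pvChain_iff]
    push Not
    refine ⟨k, by omega, ?_⟩
    simp only [Bool.not_eq_true', beq_eq_false_iff_ne, ne_eq, PySem.List.pyGet?_natCast, pvGet2] at hi
    exact hi
  · rw [if_neg h]
    symm
    rw [pvChain_iff]
    intro k hk
    by_contra hne
    apply h
    refine List.any_eq_true.mpr ⟨(k : Int), ?_, ?_⟩
    · rw [PySem.List.mem_pyRange_one]; constructor <;> [positivity; omega]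
    · simp only [Bool.not_eq_true', beq_eq_false_iff_ne, ne_eq, PySem.List.pyGet?_natCast, pvGet2]
      exact hne

lemma pvEvensRepr (cs : List Char) :
    List.filterMap (fun k : Nat => cs[2 * k]?) (List.range ((cs.length + 1) / 2)) = pvEvens cs := by
  fun_induction pvEvens cs with
  | case1 => simp
  | case2 a => simp [List.range_succ]
  | case3 a b t ih =>
    have hlen : ((a :: b :: t).length + 1) / 2 = (t.length + 1) / 2 + 1 := by
      simp [List.length_cons]; omega
    rw [hlen, List.range_succ_eq_map, List.filterMap_cons, List.filterMap_map]
    simp only [Nat.mul_zero, List.getElem?_cons_zero, Function.comp_def]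
    have : ∀ k : Nat, (a :: b :: t)[2 * (k + 1)]? = t[2 * k]? := by
      intro k
      rw [show 2 * (k + 1) = 2 * k + 1 + 1 by ring]
      simp
    simp only [this, ih]

lemma pvSliceEven (cs : List Char) : PySem.List.slice? cs none none 2 = some (pvEvens cs) := by
  rw [← pvEvensRepr]
  simp only [PySem.List.slice?, PySem.List.sliceIndices]
  norm_num
  have hif : (if 0 < cs.length then (((cs.length : Int) + 2 - 1) / 2).toNat else 0) = (cs.length + 1) / 2 := by
    split_ifs with h <;> omega
  rw [hif]
  apply List.filterMap_congr
  intro k _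
  congr 1

lemma pvSliceOdd (cs : List Char) :
    PySem.List.slice? cs (some 1) none 2 = some (pvEvens cs.tail) := by
  cases cs with
  | nil => rfl
  | cons a t =>
    rw [show (pvEvens (a :: t).tail) = pvEvens t from rfl, ← pvEvensRepr]
    simp only [PySem.List.slice?, PySem.List.sliceIndices]
    norm_num
    have hif : (if 0 < t.length then (((t.length : Int) + 2 - 1) / 2).toNat else 0) = (t.length + 1) / 2 := by
      split_ifs with h <;> omega
    rw [hif]
    apply List.filterMap_congr
    intro k _
    rw [show ((1 + 2 * (k : Int)).toNat) = 2 * k + 1 by omega]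
    simp

lemma pvAllEqFirst_cons (a c : Char) (l : List Char) :
    pvAllEqFirst (a :: c :: l) = ((a == c) && pvAllEqFirst (c :: l)) := by
  by_cases h : a = c
  · subst h; simp [pvAllEqFirst]
  · have h1 : (a == c) = false := by simpa using h
    have h2 : (c == a) = false := by simpa using (Ne.symm h)
    simp [pvAllEqFirst, h1, h2]

lemma pvChain_eq (cs : List Char) :
    pvChain cs = (pvAllEqFirst (pvEvens cs) && pvAllEqFirst (pvEvens cs.tail)) := by
  fun_induction pvChain cs with
  | case1 a b c t ih =>
    show ((a == c) && pvChain (b :: c :: t)) = _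
    rw [ih]
    have he2 : pvEvens (c :: t) = c :: pvEvens t.tail := by cases t <;> rfl
    show ((a == c) && (pvAllEqFirst (b :: pvEvens t) && pvAllEqFirst (pvEvens (c :: t)))) =
        (pvAllEqFirst (a :: pvEvens (c :: t)) && pvAllEqFirst (b :: pvEvens t))
    rw [he2, pvAllEqFirst_cons]
    cases a == c <;> cases pvAllEqFirst (b :: pvEvens t) <;>
      cases pvAllEqFirst (c :: pvEvens t.tail) <;> rfl
  | case2 x h =>
    rcases x with _ | ⟨a, _ | ⟨b, _ | ⟨c, t⟩⟩⟩
    · rfl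
    · rfl
    · rfl
    · exact absurd rfl (h a b c t)

-- ===== VERDICT (by name: the statement is the Claim_ definition above) =====
theorem Check_spec : Claim_equal_Check := by
  intro number _
  unfold Spec_Check
  simp only [Check_alt, pvSliceEven, pvSliceOdd, Option.getD_some]
  rw [pvCheck_eq_chain]
  exact pvChain_eq number.toList
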